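-- pv_equiv track=rewrite | github.com/koii-network/prometheus-beta | src/odd_sum_fibonacci.py | generate_odd_sum_fibonacci
-- ===== SOURCE A (Python) =====
-- def generate_odd_sum_fibonacci(n):
--     """
--     Generate a modified Fibonacci sequence where the sum of any two consecutive
--     numbers is always odd.
--
--     Args:
--         n (int): Number of elements to generate in the sequence.
--
--     Returns:
--         list: A list of n modified Fibonacci numbers.
--
--     Raises:
--         ValueError: If n is less than 0.
--     """
--     # Validate input
--     if not isinstance(n, int):
--         raise TypeError("Input must be an integer")
--
--     if n < 0:
--         raise ValueError("Number of elements must be non-negative")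
--
--     # Handle special cases for small n
--     if n == 0:
--         return []
--     if n == 1:
--         return [0]
--     if n == 2:
--         return [0, 1]
--
--     # Initialize the sequence
--     sequence = [0, 1]
--
--     # Generate subsequent terms
--     while len(sequence) < n:
--         # Calculate the next term with the odd sum constraint
--         prev = sequence[-1]
--         prev_prev = sequence[-2]
--
--         # Ensure the sum of the last two numbers is odd
--         # We'll modify the next term to make the sum odd
--         next_term = prev + prev_prev
--
--         # Adjust the next term if needed to ensure odd sum
--         if (prev + prev_prev) % 2 == 0:
--             next_term += 1
--
--         sequence.append(next_term)
--
--     return sequence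
-- ===== SOURCE B (Python) =====
-- def generate_odd_sum_fibonacci(n):
--     """Same result as A, built by a shifted pure-Fibonacci pipeline:
--     with c_k = a_k + 1 the tail satisfies c_k = c_{k-1} + c_{k-2}, c1 = c2 = 2,
--     so we generate the plain Fibonacci-variant values and map c -> c - 1."""
--     if not isinstance(n, int):
--         raise TypeError("Input must be an integer")
--     if n < 0:
--         raise ValueError("Number of elements must be non-negative")
--     if n == 0:
--         return []
--     cs = []
--     a, b = 2, 2
--     for _ in range(n - 1):
--         cs.append(a)
--         a, b = b, a + b
--     return [0] + [c - 1 for c in cs]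
-- ===== Notes on version B (the rewrite author's own statement) =====
-- stated objective: simpler
-- what changed: B drops A's seq[-1]/seq[-2] scan-and-adjust loop with its parity branch: shifting each tail term up by one turns the recurrence into plain Fibonacci, so B runs a pair-state Fibonacci loop seeded (2,2) and maps each value back down after the fixed initial element.
import Mathlib
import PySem

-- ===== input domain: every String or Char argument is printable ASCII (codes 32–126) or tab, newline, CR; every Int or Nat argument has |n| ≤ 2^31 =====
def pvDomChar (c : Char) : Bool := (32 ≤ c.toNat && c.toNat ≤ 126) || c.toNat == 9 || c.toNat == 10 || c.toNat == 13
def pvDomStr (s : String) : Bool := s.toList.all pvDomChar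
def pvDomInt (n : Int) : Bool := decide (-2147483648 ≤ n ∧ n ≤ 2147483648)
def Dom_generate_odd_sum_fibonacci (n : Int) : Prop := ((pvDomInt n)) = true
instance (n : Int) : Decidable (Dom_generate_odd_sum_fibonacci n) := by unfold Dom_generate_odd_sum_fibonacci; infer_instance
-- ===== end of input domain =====

-- B replaces A's scan-and-adjust loop by a shifted pure-Fibonacci pair-state loop
-- plus a final map (objective: simpler). Pre_ excludes n < 0, where A raises ValueError.


-- ===== PORT A =====
-- A's `while len(sequence) < n` loop, run as structural recursion on the remaining
-- count n - len(sequence); seq[-1]/seq[-2] via pyGetD (seq always has length ≥ 2,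
-- so the default 0 is unreachable).
def pvALoop (fuel : Nat) (seq : List Int) : List Int :=
  match fuel with
  | 0 => seq
  | k + 1 =>
    let prev := PySem.List.pyGetD seq (-1) 0
    let prev_prev := PySem.List.pyGetD seq (-2) 0
    let next_term := prev + prev_prev
    let next_term := if PySem.Int.mod (prev + prev_prev) 2 = 0 then next_term + 1 else next_term
    pvALoop k (seq ++ [next_term])

def generate_odd_sum_fibonacci (n : Int) : List Int :=
  -- n < 0 raises ValueError in Python: excluded by Pre_ below
  if n = 0 then []
  else if n = 1 then [0]
  else if n = 2 then [0, 1]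
  else pvALoop (n - 2).toNat [0, 1]

-- ===== PORT B =====
-- B's `for _ in range(n-1)` pair-state loop building cs, then [0] + [c-1 for c in cs].
def pvBLoop (fuel : Nat) (a b : Int) : List Int :=
  match fuel with
  | 0 => []
  | k + 1 => a :: pvBLoop k b (a + b)

def generate_odd_sum_fibonacci_alt (n : Int) : List Int :=
  if n = 0 then []
  else 0 :: (pvBLoop (n - 1).toNat 2 2).map (· - 1)

-- ===== PRECONDITION & SPEC =====
-- A raises ValueError for n < 0; exactly those inputs are excluded.
def Pre_generate_odd_sum_fibonacci (n : Int) : Prop := 0 ≤ n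
instance (n : Int) : Decidable (Pre_generate_odd_sum_fibonacci n) := by unfold Pre_generate_odd_sum_fibonacci; infer_instance

def pvWitness_generate_odd_sum_fibonacci : Int := 6

def Spec_generate_odd_sum_fibonacci (n : Int) (out : List Int) : Prop := out = generate_odd_sum_fibonacci_alt n
instance (n : Int) (out : List Int) : Decidable (Spec_generate_odd_sum_fibonacci n out) := by unfold Spec_generate_odd_sum_fibonacci; infer_instance

-- ===== CLAIM (what is proved, stated in full; the proofs are below) =====
def Claim_equal_generate_odd_sum_fibonacci : Prop := ∀ (n : Int), Dom_generate_odd_sum_fibonacci n → Pre_generate_odd_sum_fibonacci n → Spec_generate_odd_sum_fibonacci n (generate_odd_sum_fibonacci n)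

-- ===== LEMMAS AND PROOFS =====

-- Core invariant: from a sequence ending in two odd terms y, z, A's loop appends
-- exactly the (c - 1)-images of B's pure-Fibonacci loop seeded appropriately.
theorem pvLoop_eq (k : Nat) : ∀ (s : List Int) (y z : Int), y % 2 = 1 → z % 2 = 1 →
    pvALoop k (s ++ [y, z]) = (s ++ [y, z]) ++ (pvBLoop k (y + z + 2) (z + 1 + (y + z + 2))).map (· - 1) := by
  induction k with
  | zero => intro s y z _ _; simp [pvALoop, pvBLoop]
  | succ k ih =>
    intro s y z hy hz
    have hlast : PySem.List.pyGetD (s ++ [y, z]) (-1) 0 = z := by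
      have : s ++ [y, z] = (s ++ [y]) ++ [z] := by simp
      rw [this, PySem.List.pyGetD_neg_one_append_singleton]
    have hlast2 : PySem.List.pyGetD (s ++ [y, z]) (-2) 0 = y := by
      rw [PySem.List.pyGetD_neg_ofNat (s ++ [y, z]) 2 0 (by omega) (by simp)]
      simp
    have hmod : PySem.Int.mod (z + y) 2 = 0 := by
      have : (z + y) % 2 = 0 := by omega
      simp [PySem.Int.mod, Int.fmod_eq_emod, this]
    rw [pvALoop, hlast, hlast2]
    simp only [hmod, if_pos]
    have hassoc : s ++ [y, z] ++ [z + y + 1] = (s ++ [y]) ++ [z, z + y + 1] := by simp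
    rw [hassoc, ih (s ++ [y]) z (z + y + 1) hz (by omega)]
    rw [pvBLoop]
    simp only [List.map_cons]
    have e1 : z + (z + y + 1) + 2 = z + 1 + (y + z + 2) := by ring
    have e2 : z + y + 1 + 1 + (z + 1 + (y + z + 2)) = y + z + 2 + (z + 1 + (y + z + 2)) := by ring
    rw [e1, e2]; simp; omega

-- ===== VERDICT (by name: the statement is the Claim_ definition above) =====
theorem generate_odd_sum_fibonacci_spec : Claim_equal_generate_odd_sum_fibonacci := by
  intro n _ hpre
  unfold Spec_generate_odd_sum_fibonacci generate_odd_sum_fibonacci generate_odd_sum_fibonacci_alt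
  unfold Pre_generate_odd_sum_fibonacci at hpre
  by_cases h0 : n = 0
  · simp [h0]
  by_cases h1 : n = 1
  · subst h1; decide
  by_cases h2 : n = 2
  · subst h2; decide
  -- n ≥ 3
  have hn3 : 3 ≤ n := by omega
  simp only [h0, h1, h2, if_false]
  obtain ⟨m, hm⟩ : ∃ m : Nat, (n - 2).toNat = m + 1 := ⟨(n - 3).toNat, by omega⟩
  have hm' : (n - 1).toNat = m + 2 := by omega
  rw [hm, hm']
  -- first iteration of A's loop: prev = 1, prev_prev = 0, sum odd → next = 1
  have hstep : pvALoop (m + 1) [0, 1] = pvALoop m ([0] ++ [1, 1]) := by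
    rw [pvALoop]
    norm_num [PySem.List.pyGetD, PySem.List.pyGet?, PySem.List.pyIdx?, PySem.Int.mod, Int.fmod_eq_emod]
  rw [hstep, pvLoop_eq m [0] 1 1 (by decide) (by decide)]
  rw [pvBLoop, pvBLoop]
  norm_num
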